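-- pv_equiv track=rewrite | github.com/AvianJay/useless-script | discord/ReportSystem.py | get_time_text
-- ===== SOURCE A (Python) =====
-- def get_time_text(seconds: int) -> str:
--     # 類型安全檢查
--     if isinstance(seconds, list):
--         seconds = seconds[0] if seconds else 0
--     if not isinstance(seconds, (int, float)):
--         try:
--             seconds = int(seconds)
--         except (ValueError, TypeError):
--             return "未知時間"
--     seconds = int(seconds)
--
--     if seconds <= 0:
--         return "0 秒"
--
--     final = ""
--     while seconds != 0:
--         if seconds < 60:
--             final += f" {seconds} 秒"
--             seconds = 0
--         elif seconds < 3600: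
--             final += f" {seconds // 60} 分鐘"
--             seconds = seconds % 60
--         elif seconds < 86400:
--             final += f" {seconds // 3600} 小時"
--             seconds = seconds % 3600
--         else:
--             final += f" {seconds // 86400} 天"
--             seconds = seconds % 86400
--     return final.strip()
-- ===== SOURCE B (Python) =====
-- def get_time_text(seconds: int) -> str:
--     # 類型安全檢查
--     if isinstance(seconds, list):
--         seconds = seconds[0] if seconds else 0
--     if not isinstance(seconds, (int, float)):
--         try:
--             seconds = int(seconds)
--         except (ValueError, TypeError):
--             return "未知時間"
--     seconds = int(seconds)
--
--     if seconds <= 0: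
--         return "0 秒"
--
--     days, rem = divmod(seconds, 86400)
--     hours, rem = divmod(rem, 3600)
--     minutes, secs = divmod(rem, 60)
--     parts = []
--     if days:
--         parts.append(f"{days} 天")
--     if hours:
--         parts.append(f"{hours} 小時")
--     if minutes:
--         parts.append(f"{minutes} 分鐘")
--     if secs:
--         parts.append(f"{secs} 秒")
--     return " ".join(parts)
-- ===== Notes on version B (the rewrite author's own statement) =====
-- stated objective: simpler
-- what changed: Replaces the state-mutating while-loop (repeated threshold tests and accumulating a string that must be stripped) with one closed-form divmod chain into days/hours/minutes/seconds and a ' '.join over the nonzero parts.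
import Mathlib
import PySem

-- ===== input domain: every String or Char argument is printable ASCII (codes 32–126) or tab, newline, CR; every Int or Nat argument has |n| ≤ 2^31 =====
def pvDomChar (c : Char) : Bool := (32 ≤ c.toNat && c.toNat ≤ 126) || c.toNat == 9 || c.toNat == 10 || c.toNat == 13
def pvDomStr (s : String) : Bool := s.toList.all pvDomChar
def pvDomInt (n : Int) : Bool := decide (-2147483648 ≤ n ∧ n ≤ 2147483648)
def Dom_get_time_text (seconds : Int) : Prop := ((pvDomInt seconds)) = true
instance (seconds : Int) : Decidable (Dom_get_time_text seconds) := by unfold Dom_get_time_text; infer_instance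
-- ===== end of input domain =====

-- B replaces A's state-mutating while-loop with a closed-form divmod chain and a join
-- over the nonzero parts; objective: simpler. Equivalence of return values is proved for all Int inputs.

-- ===== PORT A =====
-- the while-loop of A; the `seconds < 60` branch sets seconds = 0, so the loop exits right after it
def pvLoopA (s : Int) (final : String) : String :=
  if _h0 : s = 0 then final
  else if _h1 : s < 60 then final ++ " " ++ PySem.Int.toStr s ++ " 秒"
  else if _h2 : s < 3600 then
    pvLoopA (PySem.Int.mod s 60) (final ++ " " ++ PySem.Int.toStr (PySem.Int.floordiv s 60) ++ " 分鐘")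
  else if _h3 : s < 86400 then
    pvLoopA (PySem.Int.mod s 3600) (final ++ " " ++ PySem.Int.toStr (PySem.Int.floordiv s 3600) ++ " 小時")
  else
    pvLoopA (PySem.Int.mod s 86400) (final ++ " " ++ PySem.Int.toStr (PySem.Int.floordiv s 86400) ++ " 天")
termination_by s.toNat
decreasing_by
  · simp only [PySem.Int.mod]; rw [Int.fmod_eq_emod, if_pos (Or.inl (by norm_num : (0:Int) ≤ 60))]; omega
  · simp only [PySem.Int.mod]; rw [Int.fmod_eq_emod, if_pos (Or.inl (by norm_num : (0:Int) ≤ 3600))]; omega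
  · simp only [PySem.Int.mod]; rw [Int.fmod_eq_emod, if_pos (Or.inl (by norm_num : (0:Int) ≤ 86400))]; omega

-- the isinstance/int() preamble of A is a no-op for an int argument (the declared type)
def get_time_text (seconds : Int) : String :=
  if seconds ≤ 0 then "0 秒"
  else PySem.Str.strip (pvLoopA seconds "")

-- ===== PORT B =====
def get_time_text_alt (seconds : Int) : String :=
  if seconds ≤ 0 then "0 秒"
  else
    let days := PySem.Int.floordiv seconds 86400
    let rem1 := PySem.Int.mod seconds 86400
    let hours := PySem.Int.floordiv rem1 3600
    let rem2 := PySem.Int.mod rem1 3600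
    let minutes := PySem.Int.floordiv rem2 60
    let secs := PySem.Int.mod rem2 60
    let parts : List String :=
      (if days ≠ 0 then [PySem.Int.toStr days ++ " 天"] else []) ++
      (if hours ≠ 0 then [PySem.Int.toStr hours ++ " 小時"] else []) ++
      (if minutes ≠ 0 then [PySem.Int.toStr minutes ++ " 分鐘"] else []) ++
      (if secs ≠ 0 then [PySem.Int.toStr secs ++ " 秒"] else [])
    PySem.Str.join " " parts

-- ===== PRECONDITION & SPEC =====
def Spec_get_time_text (seconds : Int) (out : String) : Prop := out = get_time_text_alt seconds
instance (seconds : Int) (out : String) : Decidable (Spec_get_time_text seconds out) := by unfold Spec_get_time_text; infer_instance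

-- ===== CLAIM (what is proved, stated in full; the proofs are below) =====
def Claim_equal_get_time_text : Prop := ∀ (seconds : Int), Dom_get_time_text seconds → Spec_get_time_text seconds (get_time_text seconds)

-- ===== LEMMAS AND PROOFS =====

-- arithmetic bridges cited by pvLoopA's decreasing_by (divisors here are positive literals)
theorem pv_fdiv (a b : Int) (hb : 0 ≤ b) : PySem.Int.floordiv a b = a / b := by
  simp only [PySem.Int.floordiv]; rw [Int.fdiv_eq_ediv]; simp [hb]

theorem pv_fmod (a b : Int) (hb : 0 ≤ b) : PySem.Int.mod a b = a % b := by
  simp only [PySem.Int.mod]; rw [Int.fmod_eq_emod]; simp [hb]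

-- parts of B, grouped the way A's loop emits them
def pvPartsMS (r : Int) : List String :=
  (if PySem.Int.floordiv r 60 ≠ 0 then [PySem.Int.toStr (PySem.Int.floordiv r 60) ++ " 分鐘"] else []) ++
  (if PySem.Int.mod r 60 ≠ 0 then [PySem.Int.toStr (PySem.Int.mod r 60) ++ " 秒"] else [])

def pvPartsHMS (r : Int) : List String :=
  (if PySem.Int.floordiv r 3600 ≠ 0 then [PySem.Int.toStr (PySem.Int.floordiv r 3600) ++ " 小時"] else []) ++
  pvPartsMS (PySem.Int.mod r 3600)

def pvPartsAll (s : Int) : List String :=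
  (if PySem.Int.floordiv s 86400 ≠ 0 then [PySem.Int.toStr (PySem.Int.floordiv s 86400) ++ " 天"] else []) ++
  pvPartsHMS (PySem.Int.mod s 86400)

-- the raw concatenation A's loop produces: a leading space before every part
def pvCat : List String → String
  | [] => ""
  | p :: ps => " " ++ p ++ pvCat ps

theorem pv_cat_nil : pvCat [] = "" := rfl
theorem pv_cat_cons (p : String) (ps : List String) : pvCat (p :: ps) = " " ++ p ++ pvCat ps := rfl

theorem pv_append_empty (s : String) : s ++ "" = s := by apply String.ext; simp
theorem pv_empty_append (s : String) : "" ++ s = s := by apply String.ext; simp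

-- a part is nonempty, and starts and ends with a non-whitespace character
def pvGood (p : List Char) : Prop :=
  (∃ c, p.head? = some c ∧ PySem.Chars.isspace c = false) ∧
  (∃ c, p.getLast? = some c ∧ PySem.Chars.isspace c = false)

theorem pv_digitChar_nonspace (n : Nat) : PySem.Chars.isspace (Nat.digitChar n) = false := by
  by_cases h : n < 16
  · interval_cases n <;> decide
  · unfold Nat.digitChar
    repeat rw [if_neg (by omega)]
    decide

theorem pv_toDigitsCore_nonspace (b : Nat) :
    ∀ (f n : Nat) (l : List Char), (∀ c ∈ l, PySem.Chars.isspace c = false) →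
      ∀ c ∈ Nat.toDigitsCore b f n l, PySem.Chars.isspace c = false := by
  intro f
  induction f with
  | zero => intro n l hl c hc; exact hl c (by simpa [Nat.toDigitsCore] using hc)
  | succ f ih =>
    intro n l hl c hc
    rw [Nat.toDigitsCore] at hc
    by_cases h : n / b = 0
    · simp only [h, if_pos] at hc
      rcases (List.mem_cons.mp hc) with h1 | h1
      · subst h1; exact pv_digitChar_nonspace _
      · exact hl c h1
    · simp only [if_neg h] at hc
      refine ih (n / b) _ ?_ c hc
      intro d hd
      rcases List.mem_cons.mp hd with h1 | h1
      · subst h1; exact pv_digitChar_nonspace _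
      · exact hl d h1

theorem pv_toDigitsCore_ne_nil_of_ne_nil (b : Nat) :
    ∀ (f n : Nat) (l : List Char), l ≠ [] → Nat.toDigitsCore b f n l ≠ [] := by
  intro f
  induction f with
  | zero => intro n l hl; simpa [Nat.toDigitsCore]
  | succ f ih =>
    intro n l hl
    rw [Nat.toDigitsCore]
    by_cases h : n / b = 0
    · simp [h]
    · simp only [if_neg h]
      exact ih (n / b) _ (by simp)

theorem pv_toDigitsCore_succ_ne_nil (b f n : Nat) (l : List Char) :
    Nat.toDigitsCore b (f + 1) n l ≠ [] := by
  rw [Nat.toDigitsCore]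
  by_cases h : n / b = 0
  · simp [h]
  · simp only [if_neg h]
    exact pv_toDigitsCore_ne_nil_of_ne_nil b f (n / b) _ (by simp)

theorem pv_toChars_nonspace (q : Int) : ∀ c ∈ PySem.Int.toChars q, PySem.Chars.isspace c = false := by
  intro c hc
  simp only [PySem.Int.toChars] at hc
  split_ifs at hc with h
  · rcases List.mem_cons.mp hc with h1 | h1
    · subst h1; decide
    · exact pv_toDigitsCore_nonspace 10 _ _ [] (by simp) c h1
  · exact pv_toDigitsCore_nonspace 10 _ _ [] (by simp) c hc

theorem pv_toChars_ne_nil (q : Int) : PySem.Int.toChars q ≠ [] := by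
  simp only [PySem.Int.toChars]
  split_ifs with h
  · simp
  · exact pv_toDigitsCore_succ_ne_nil 10 _ _ []

-- every part B builds is good: it is  str(q) ++ " " ++ <unit>  with a non-space unit at the end
theorem pv_good_part (q : Int) (u : List Char) (c : Char) (hu : PySem.Chars.isspace c = false) :
    pvGood ((PySem.Int.toStr q).toList ++ (' ' :: (u ++ [c]))) := by
  constructor
  · have hne : (PySem.Int.toStr q).toList ≠ [] := by
      rw [PySem.Int.toList_toStr]; exact pv_toChars_ne_nil q
    rcases List.exists_cons_of_ne_nil hne with ⟨d, t, ht⟩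
    refine ⟨d, ?_, ?_⟩
    · simp [ht]
    · apply pv_toChars_nonspace q
      rw [← PySem.Int.toList_toStr, ht]; simp
  · refine ⟨c, ?_, hu⟩
    have hsh : (PySem.Int.toStr q).toList ++ (' ' :: (u ++ [c])) =
        ((PySem.Int.toStr q).toList ++ (' ' :: u)) ++ [c] := by simp
    rw [hsh, List.getLast?_concat]

theorem pv_mem_ite {c : Prop} [Decidable c] {p x : String} (h : p ∈ (if c then [x] else [])) :
    p = x := by
  split at h
  · simpa using h
  · simp at h

theorem pv_partsAll_good (s : Int) : ∀ p ∈ pvPartsAll s, pvGood p.toList := by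
  intro p hp
  simp only [pvPartsAll, pvPartsHMS, pvPartsMS] at hp
  rcases List.mem_append.mp hp with h | h
  · rw [pv_mem_ite h]
    have hl : (PySem.Int.toStr (PySem.Int.floordiv s 86400) ++ " 天").toList =
        (PySem.Int.toStr (PySem.Int.floordiv s 86400)).toList ++ (' ' :: ([] ++ ['天'])) := by
      rw [String.toList_append]; rfl
    rw [hl]; exact pv_good_part _ [] '天' (by decide)
  rcases List.mem_append.mp h with h | h
  · rw [pv_mem_ite h]
    have hl : (PySem.Int.toStr (PySem.Int.floordiv (PySem.Int.mod s 86400) 3600) ++ " 小時").toList =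
        (PySem.Int.toStr (PySem.Int.floordiv (PySem.Int.mod s 86400) 3600)).toList ++ (' ' :: (['小'] ++ ['時'])) := by
      rw [String.toList_append]; rfl
    rw [hl]; exact pv_good_part _ ['小'] '時' (by decide)
  rcases List.mem_append.mp h with h | h
  · rw [pv_mem_ite h]
    have hl : (PySem.Int.toStr (PySem.Int.floordiv (PySem.Int.mod (PySem.Int.mod s 86400) 3600) 60) ++ " 分鐘").toList =
        (PySem.Int.toStr (PySem.Int.floordiv (PySem.Int.mod (PySem.Int.mod s 86400) 3600) 60)).toList ++ (' ' :: (['分'] ++ ['鐘'])) := by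
      rw [String.toList_append]; rfl
    rw [hl]; exact pv_good_part _ ['分'] '鐘' (by decide)
  · rw [pv_mem_ite h]
    have hl : (PySem.Int.toStr (PySem.Int.mod (PySem.Int.mod (PySem.Int.mod s 86400) 3600) 60) ++ " 秒").toList =
        (PySem.Int.toStr (PySem.Int.mod (PySem.Int.mod (PySem.Int.mod s 86400) 3600) 60)).toList ++ (' ' :: ([] ++ ['秒'])) := by
      rw [String.toList_append]; rfl
    rw [hl]; exact pv_good_part _ [] '秒' (by decide)

-- characterisation of A's loop, built up unit by unit
theorem pv_loop1 (r : Int) (h0 : 0 ≤ r) (h1 : r < 60) (acc : String) :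
    pvLoopA r acc = acc ++ pvCat (if PySem.Int.mod r 60 ≠ 0 then [PySem.Int.toStr (PySem.Int.mod r 60) ++ " 秒"] else []) := by
  have hm : PySem.Int.mod r 60 = r := by rw [pv_fmod r 60 (by norm_num)]; omega
  rw [hm]
  by_cases h : r = 0
  · rw [pvLoopA, dif_pos h, if_neg (by simp [h]), pv_cat_nil, pv_append_empty]
  · rw [pvLoopA, dif_neg h, dif_pos h1, if_pos h, pv_cat_cons, pv_cat_nil]
    simp only [String.append_assoc, pv_append_empty]

theorem pv_loop2 (r : Int) (h0 : 0 ≤ r) (h1 : r < 3600) (acc : String) :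
    pvLoopA r acc = acc ++ pvCat (pvPartsMS r) := by
  by_cases h : r < 60
  · have hd : ¬ PySem.Int.floordiv r 60 ≠ 0 := by rw [pv_fdiv r 60 (by norm_num)]; omega
    rw [pv_loop1 r h0 h acc, pvPartsMS, if_neg hd, List.nil_append]
  · have hd : PySem.Int.floordiv r 60 ≠ 0 := by rw [pv_fdiv r 60 (by norm_num)]; omega
    have hm0 : 0 ≤ PySem.Int.mod r 60 := by rw [pv_fmod r 60 (by norm_num)]; omega
    have hm1 : PySem.Int.mod r 60 < 60 := by rw [pv_fmod r 60 (by norm_num)]; omega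
    have hmm : PySem.Int.mod (PySem.Int.mod r 60) 60 = PySem.Int.mod r 60 := by
      rw [pv_fmod (PySem.Int.mod r 60) 60 (by norm_num), pv_fmod r 60 (by norm_num)]; omega
    rw [pvLoopA, dif_neg (show ¬ r = 0 by omega), dif_neg h, dif_pos h1,
      pv_loop1 (PySem.Int.mod r 60) hm0 hm1, hmm, pvPartsMS, if_pos hd, List.singleton_append,
      pv_cat_cons]
    simp only [String.append_assoc]

theorem pv_loop3 (r : Int) (h0 : 0 ≤ r) (h1 : r < 86400) (acc : String) :
    pvLoopA r acc = acc ++ pvCat (pvPartsHMS r) := by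
  by_cases h : r < 3600
  · have hd : ¬ PySem.Int.floordiv r 3600 ≠ 0 := by rw [pv_fdiv r 3600 (by norm_num)]; omega
    have hm : PySem.Int.mod r 3600 = r := by rw [pv_fmod r 3600 (by norm_num)]; omega
    rw [pv_loop2 r h0 h acc, pvPartsHMS, if_neg hd, List.nil_append, hm]
  · have hd : PySem.Int.floordiv r 3600 ≠ 0 := by rw [pv_fdiv r 3600 (by norm_num)]; omega
    have hm0 : 0 ≤ PySem.Int.mod r 3600 := by rw [pv_fmod r 3600 (by norm_num)]; omega
    have hm1 : PySem.Int.mod r 3600 < 3600 := by rw [pv_fmod r 3600 (by norm_num)]; omega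
    rw [pvLoopA, dif_neg (show ¬ r = 0 by omega), dif_neg (show ¬ r < 60 by omega), dif_neg h,
      dif_pos h1, pv_loop2 (PySem.Int.mod r 3600) hm0 (by omega), pvPartsHMS, if_pos hd,
      List.singleton_append, pv_cat_cons]
    simp only [String.append_assoc]

theorem pv_loopAll (s : Int) (hs : 0 < s) : pvLoopA s "" = pvCat (pvPartsAll s) := by
  by_cases h : s < 86400
  · have hd : ¬ PySem.Int.floordiv s 86400 ≠ 0 := by rw [pv_fdiv s 86400 (by norm_num)]; omega
    have hm : PySem.Int.mod s 86400 = s := by rw [pv_fmod s 86400 (by norm_num)]; omega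
    rw [pv_loop3 s (by omega) h "", pvPartsAll, if_neg hd, List.nil_append, hm, pv_empty_append]
  · have hd : PySem.Int.floordiv s 86400 ≠ 0 := by rw [pv_fdiv s 86400 (by norm_num)]; omega
    have hm0 : 0 ≤ PySem.Int.mod s 86400 := by rw [pv_fmod s 86400 (by norm_num)]; omega
    have hm1 : PySem.Int.mod s 86400 < 86400 := by rw [pv_fmod s 86400 (by norm_num)]; omega
    rw [pvLoopA, dif_neg (show ¬ s = 0 by omega), dif_neg (show ¬ s < 60 by omega),
      dif_neg (show ¬ s < 3600 by omega), dif_neg h, pv_loop3 (PySem.Int.mod s 86400) hm0 hm1,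
      pvPartsAll, if_pos hd, List.singleton_append, pv_cat_cons]
    simp only [String.append_assoc, pv_empty_append]

theorem pv_cat_toList (ps : List String) :
    (pvCat ps).toList = (ps.map (fun p => ' ' :: p.toList)).flatten := by
  induction ps with
  | nil => rfl
  | cons p ps ih => simp [pvCat, ih]

theorem pv_inter_cons_cons (p q : List Char) (ps : List (List Char)) :
    List.intercalate [' '] (p :: q :: ps) = p ++ ' ' :: List.intercalate [' '] (q :: ps) := by
  simp only [List.intercalate, List.intersperse, List.flatten_cons]
  rfl

theorem pv_inter_ne_nil (q : List Char) (ps : List (List Char)) (hq : q ≠ []) :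
    List.intercalate [' '] (q :: ps) ≠ [] := by
  cases ps with
  | nil => simpa [List.intercalate]
  | cons r ps =>
    rw [pv_inter_cons_cons]
    exact List.append_ne_nil_of_right_ne_nil _ (by simp)

theorem pv_flat_cons (ps : List (List Char)) (h : ps ≠ []) :
    (ps.map (fun p => ' ' :: p)).flatten = ' ' :: List.intercalate [' '] ps := by
  induction ps with
  | nil => cases h rfl
  | cons p ps ih =>
    cases ps with
    | nil => simp [List.intercalate]
    | cons q ps =>
      rw [List.map_cons, List.flatten_cons, ih (by simp), pv_inter_cons_cons]
      rfl

theorem pv_intercalate_head? (p : List Char) (ps : List (List Char)) (hp : p ≠ []) :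
    (List.intercalate [' '] (p :: ps)).head? = p.head? := by
  cases ps with
  | nil => simp [List.intercalate]
  | cons q ps => rw [pv_inter_cons_cons, List.head?_append_of_ne_nil _ hp]

theorem pv_intercalate_getLast? (ps : List (List Char)) (h : ps ≠ []) (hne : ∀ p ∈ ps, p ≠ []) :
    ∃ p ∈ ps, (List.intercalate [' '] ps).getLast? = p.getLast? := by
  induction ps with
  | nil => cases h rfl
  | cons p ps ih =>
    cases ps with
    | nil => exact ⟨p, by simp, by simp [List.intercalate]⟩
    | cons q ps =>
      rcases ih (by simp) (fun x hx => hne x (List.mem_cons_of_mem _ hx)) with ⟨r, hr, hlast⟩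
      refine ⟨r, List.mem_cons_of_mem _ hr, ?_⟩
      have hX : List.intercalate [' '] (q :: ps) ≠ [] := pv_inter_ne_nil q ps (hne q (by simp))
      rw [pv_inter_cons_cons, List.getLast?_append_of_ne_nil _ (by simp),
        show (' ' :: List.intercalate [' '] (q :: ps)) = [' '] ++ List.intercalate [' '] (q :: ps) from rfl,
        List.getLast?_append_of_ne_nil _ hX, hlast]

theorem pv_strip_space_cons (m : List Char)
    (h1 : ∃ c, m.head? = some c ∧ PySem.Chars.isspace c = false)
    (h2 : ∃ c, m.getLast? = some c ∧ PySem.Chars.isspace c = false) :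
    PySem.Chars.strip (' ' :: m) = m := by
  rcases h1 with ⟨c, hc, hcn⟩
  rcases h2 with ⟨d, hd, hdn⟩
  rcases m with _ | ⟨a, t⟩
  · simp at hc
  · have hac : a = c := by simpa using hc
    have hcn' : PySem.Chars.isspace a = false := by rw [hac]; exact hcn
    have hl : PySem.Chars.lstrip (' ' :: a :: t) = a :: t := by
      simp [PySem.Chars.lstrip, List.dropWhile, hcn', show PySem.Chars.isspace ' ' = true from rfl]
    have hrev : ((a :: t).reverse).head? = some d := by
      rw [List.head?_reverse]; exact hd
    have hr : PySem.Chars.rstrip (a :: t) = a :: t := by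
      rcases hrec : (a :: t).reverse with _ | ⟨x, xs⟩
      · simp at hrec
      · have hxd : x = d := by rw [hrec] at hrev; simpa using hrev
        have hdn' : PySem.Chars.isspace x = false := by rw [hxd]; exact hdn
        simp only [PySem.Chars.rstrip, hrec, List.dropWhile, hdn']
        rw [← hrec, List.reverse_reverse]
    simp only [PySem.Chars.strip, hl, hr]

theorem pv_strip_cat (ps : List String) (h : ∀ p ∈ ps, pvGood p.toList) :
    PySem.Str.strip (pvCat ps) = PySem.Str.join " " ps := by
  apply String.ext
  rw [PySem.Str.toList_strip, PySem.Str.toList_join, pv_cat_toList]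
  rw [show (" " : String).toList = [' '] from rfl]
  cases ps with
  | nil => rfl
  | cons p ps =>
    rw [List.map_cons, List.map_cons]
    rw [show (' ' :: p.toList) :: List.map (fun q => ' ' :: String.toList q) ps =
        (p.toList :: List.map String.toList ps).map (fun q => ' ' :: q) by simp]
    rw [pv_flat_cons _ (by simp)]
    simp only [PySem.Chars.join]
    have hne : ∀ q ∈ p.toList :: List.map String.toList ps, q ≠ [] := by
      intro q hq hqnil
      rcases List.mem_cons.mp hq with h1 | h1
      · rcases (h p (by simp)).1 with ⟨c, hc, -⟩
        rw [← h1, hqnil] at hc; simp at hc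
      · rcases List.mem_map.mp h1 with ⟨r, hr, hrq⟩
        rcases (h r (List.mem_cons_of_mem _ hr)).1 with ⟨c, hc, -⟩
        rw [hrq, hqnil] at hc; simp at hc
    apply pv_strip_space_cons
    · rcases (h p (by simp)).1 with ⟨c, hc, hcn⟩
      refine ⟨c, ?_, hcn⟩
      rw [pv_intercalate_head? _ _ (hne p.toList (by simp))]; exact hc
    · rcases pv_intercalate_getLast? (p.toList :: List.map String.toList ps) (by simp) hne with
        ⟨q, hq, hlast⟩
      have : ∃ r ∈ p :: ps, q = r.toList := by
        rcases List.mem_cons.mp hq with h1 | h1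
        · exact ⟨p, by simp, h1⟩
        · rcases List.mem_map.mp h1 with ⟨r, hr, hrq⟩
          exact ⟨r, List.mem_cons_of_mem _ hr, hrq.symm⟩
      rcases this with ⟨r, hr, hqr⟩
      rcases (h r hr).2 with ⟨c, hc, hcn⟩
      exact ⟨c, by rw [hlast, hqr]; exact hc, hcn⟩

theorem pv_alt_eq (s : Int) (hs : ¬ s ≤ 0) :
    get_time_text_alt s = PySem.Str.join " " (pvPartsAll s) := by
  simp only [get_time_text_alt, if_neg hs, pvPartsAll, pvPartsHMS, pvPartsMS, List.append_assoc]

-- ===== VERDICT (by name: the statement is the Claim_ definition above) =====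
theorem get_time_text_spec : Claim_equal_get_time_text := by
  intro s _
  unfold Spec_get_time_text
  by_cases hs : s ≤ 0
  · simp [get_time_text, get_time_text_alt, hs]
  · rw [get_time_text, if_neg hs, pv_loopAll s (by omega), pv_alt_eq s hs]
    exact pv_strip_cat _ (pv_partsAll_good s)
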